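-- pv_equiv track=rewrite | github.com/subham121/AI_AS_A_SERVICE | catalog_service/app.py | identify_capability_from_skill
-- ===== SOURCE A (Python) =====
-- def normalize_text(text: str) -> str:
--     return "".join(ch.lower() if ch.isalnum() else " " for ch in text).strip()
--
-- def identify_capability_from_skill(skill: str, capability_list: list[str]) -> str | None:
--     normalized_skill = normalize_text(skill)
--     if not normalized_skill:
--         return None
--     skill_terms = set(normalized_skill.split())
--     ranked: list[tuple[int, int, str]] = []
--     for capability in capability_list:
--         normalized_capability = normalize_text(capability)
--         capability_terms = set(normalized_capability.split())
--         score = 0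
--         if normalized_capability == normalized_skill:
--             score += 100
--         if normalized_capability in normalized_skill:
--             score += 20
--         if skill_terms & capability_terms:
--             score += len(skill_terms & capability_terms) * 5
--         if score > 0:
--             ranked.append((score, len(normalized_capability), capability))
--     if not ranked:
--         return None
--     ranked.sort(key=lambda item: (-item[0], item[1], item[2]))
--     return ranked[0][2]
-- ===== SOURCE B (Python) =====
-- def normalize_text(text: str) -> str:
--     return "".join(ch.lower() if ch.isalnum() else " " for ch in text).strip()
--
-- def identify_capability_from_skill(skill: str, capability_list: list[str]) -> str | None:
--     normalized_skill = normalize_text(skill)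
--     if not normalized_skill:
--         return None
--     skill_terms = set(normalized_skill.split())
--     best = None
--     for capability in capability_list:
--         normalized_capability = normalize_text(capability)
--         capability_terms = set(normalized_capability.split())
--         score = 0
--         if normalized_capability == normalized_skill:
--             score += 100
--         if normalized_capability in normalized_skill:
--             score += 20
--         if skill_terms & capability_terms:
--             score += len(skill_terms & capability_terms) * 5
--         if score > 0:
--             key = (-score, len(normalized_capability), capability)
--             if best is None or key < best[0]:
--                 best = (key, capability)
--     return best[1] if best is not None else None
-- ===== Notes on version B (the rewrite author's own statement) =====
-- stated objective: simpler
-- what changed: B drops A's ranked-list accumulation and full stable sort, keeping a single running best (strict '<' on the same (-score, len, capability) key) during the one pass over capability_list.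
import Mathlib
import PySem

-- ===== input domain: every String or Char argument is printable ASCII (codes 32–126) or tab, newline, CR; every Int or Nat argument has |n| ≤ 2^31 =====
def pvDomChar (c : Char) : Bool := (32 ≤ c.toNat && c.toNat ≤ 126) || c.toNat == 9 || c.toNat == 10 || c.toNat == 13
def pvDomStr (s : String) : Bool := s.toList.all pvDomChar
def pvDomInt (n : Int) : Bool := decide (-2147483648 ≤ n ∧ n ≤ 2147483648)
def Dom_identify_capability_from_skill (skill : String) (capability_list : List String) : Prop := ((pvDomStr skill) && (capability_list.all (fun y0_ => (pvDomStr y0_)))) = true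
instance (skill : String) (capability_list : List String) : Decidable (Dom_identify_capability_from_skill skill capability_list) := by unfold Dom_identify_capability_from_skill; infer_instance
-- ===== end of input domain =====

-- B replaces A's append-to-list + full stable sort + take-head by a single running best
-- (strict '<' on the same (-score, len, capability) key), returning the same capability; objective: simpler, no sort.

-- ===== PORT A =====
-- normalize_text, shared by both Pythons (kept on List Char)
def pvNormalize (t : List Char) : List Char :=
  PySem.Chars.strip (t.map (fun ch => if PySem.Chars.isalnum ch then PySem.Chars.lowerChar ch else ' '))

-- the per-capability score block (identical lines in A and B): returns (score, len(normalized_capability))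
def pvScoreLen (ns : List Char) (skillTerms : PySem.Set (List Char)) (capability : String) : Int × Int :=
  let nc := pvNormalize capability.toList
  let capTerms : PySem.Set (List Char) := PySem.Set.ofList (PySem.Chars.split₀ nc)
  let inter := PySem.Set.inter skillTerms capTerms
  let score : Int :=
    (if nc = ns then 100 else 0) +
    (if PySem.Chars.isIn nc ns then 20 else 0) +
    (if inter ≠ [] then (inter.length : Int) * 5 else 0)
  (score, (nc.length : Int))

-- loop body of A: append (score, len, capability) when score > 0
def pvStepA (ns : List Char) (st : PySem.Set (List Char))
    (acc : List (Int × Int × String)) (capability : String) : List (Int × Int × String) :=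
  let sl := pvScoreLen ns st capability
  if sl.1 > 0 then acc ++ [(sl.1, sl.2, capability)] else acc

def identify_capability_from_skill (skill : String) (capability_list : List String) : Option String :=
  let ns := pvNormalize skill.toList
  if ns = [] then none
  else
    let skillTerms : PySem.Set (List Char) := PySem.Set.ofList (PySem.Chars.split₀ ns)
    let ranked := capability_list.foldl (pvStepA ns skillTerms) []
    if ranked = [] then none
    else
      match PySem.List.sorted ranked
          (fun item => toLex ((-item.1 : Int), toLex (item.2.1, item.2.2))) false with
      | [] => none
      | m :: _ => some m.2.2

-- ===== PORT B =====
-- Python tuple '<' on (-score, len, capability), lexicographic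
def lexLt3 (a b : Int × Int × String) : Bool :=
  decide (a.1 < b.1) ||
    (decide (a.1 = b.1) &&
      (decide (a.2.1 < b.2.1) || (decide (a.2.1 = b.2.1) && decide (a.2.2 < b.2.2))))

-- loop body of B: running best of (key, capability) under strict '<'
def pvStepB (ns : List Char) (st : PySem.Set (List Char))
    (best : Option ((Int × Int × String) × String)) (capability : String) :
    Option ((Int × Int × String) × String) :=
  let sl := pvScoreLen ns st capability
  if sl.1 > 0 then
    let key : Int × Int × String := (-sl.1, sl.2, capability)
    match best with
    | none => some (key, capability)
    | some b => if lexLt3 key b.1 then some (key, capability) else some b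
  else best

def identify_capability_from_skill_alt (skill : String) (capability_list : List String) : Option String :=
  let ns := pvNormalize skill.toList
  if ns = [] then none
  else
    let skillTerms : PySem.Set (List Char) := PySem.Set.ofList (PySem.Chars.split₀ ns)
    match capability_list.foldl (pvStepB ns skillTerms) none with
    | none => none
    | some b => some b.2

-- ===== PRECONDITION & SPEC =====
def Spec_identify_capability_from_skill (skill : String) (capability_list : List String) (out : Option String) : Prop := out = identify_capability_from_skill_alt skill capability_list
instance (skill : String) (capability_list : List String) (out : Option String) : Decidable (Spec_identify_capability_from_skill skill capability_list out) := by unfold Spec_identify_capability_from_skill; infer_instance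

-- ===== CLAIM (what is proved, stated in full; the proofs are below) =====
def Claim_equal_identify_capability_from_skill : Prop := ∀ (skill : String) (capability_list : List String), Dom_identify_capability_from_skill skill capability_list → Spec_identify_capability_from_skill skill capability_list (identify_capability_from_skill skill capability_list)

-- ===== LEMMAS AND PROOFS =====

-- the sort key of A, as one lexicographic value
def pvKey (e : Int × Int × String) : Int ×ₗ Int ×ₗ String :=
  toLex ((-e.1 : Int), toLex (e.2.1, e.2.2))

lemma pvKey_inj {e e' : Int × Int × String} (h : pvKey e = pvKey e') : e = e' := by
  unfold pvKey at h
  have h' := congrArg (fun x => ofLex x) h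
  simp only [ofLex_toLex] at h'
  obtain ⟨h1, h2⟩ := Prod.mk.injEq .. ▸ h'
  have h2' := congrArg (fun x => ofLex x) h2
  simp only [ofLex_toLex] at h2'
  obtain ⟨h3, h4⟩ := Prod.mk.injEq .. ▸ h2'
  have : e.1 = e'.1 := by omega
  exact Prod.ext this (Prod.ext h3 h4)

lemma lexLt3_iff (e e' : Int × Int × String) :
    lexLt3 (-e.1, e.2.1, e.2.2) (-e'.1, e'.2.1, e'.2.2) = true ↔ pvKey e < pvKey e' := by
  unfold lexLt3 pvKey
  rw [Prod.Lex.toLex_lt_toLex, Prod.Lex.toLex_lt_toLex]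
  simp

-- invariant linking A's accumulated ranked list with B's running best
def pvRel (acc : List (Int × Int × String)) (b : Option ((Int × Int × String) × String)) : Prop :=
  (b = none → acc = []) ∧
  (∀ k c, b = some (k, c) →
    ∃ e ∈ acc, k = (-e.1, e.2.1, e.2.2) ∧ c = e.2.2 ∧ ∀ e' ∈ acc, pvKey e ≤ pvKey e')

lemma pvRel_fold (ns : List Char) (st : PySem.Set (List Char)) :
    ∀ (caps : List String) (acc : List (Int × Int × String))
      (b : Option ((Int × Int × String) × String)),
      pvRel acc b → pvRel (caps.foldl (pvStepA ns st) acc) (caps.foldl (pvStepB ns st) b) := by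
  intro caps
  induction caps with
  | nil => intro acc b h; exact h
  | cons cap rest ih =>
    intro acc b h
    simp only [List.foldl_cons]
    apply ih
    unfold pvStepA pvStepB
    by_cases hs : (pvScoreLen ns st cap).1 > 0
    · simp only [hs, if_pos]
      set e : Int × Int × String := ((pvScoreLen ns st cap).1, (pvScoreLen ns st cap).2, cap) with he
      match b with
      | none =>
        have hacc : acc = [] := h.1 rfl
        subst hacc
        refine ⟨by simp, ?_⟩
        intro k c hk
        simp only [Option.some.injEq, Prod.mk.injEq] at hk
        refine ⟨e, by simp, ?_, ?_, ?_⟩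
        · simp [← hk.1, he]
        · simp [← hk.2, he]
        · intro e' he'
          simp only [List.nil_append, List.mem_singleton] at he'
          subst he'; exact le_refl _
      | some bb =>
        obtain ⟨m, hm, hkm, hcm, hmin⟩ := h.2 bb.1 bb.2 rfl
        by_cases hlt : pvKey e < pvKey m
        · have ht : lexLt3 (-(pvScoreLen ns st cap).1, (pvScoreLen ns st cap).2, cap) bb.1 = true := by
            rw [hkm]; exact (lexLt3_iff e m).2 hlt
          simp only [ht, if_true]
          refine ⟨by simp, ?_⟩
          intro k c hk
          simp only [Option.some.injEq, Prod.mk.injEq] at hk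
          refine ⟨e, by simp, by simp [← hk.1, he], by simp [← hk.2, he], ?_⟩
          intro e' he'
          rcases List.mem_append.1 he' with h1 | h1
          · exact le_of_lt (lt_of_lt_of_le hlt (hmin e' h1))
          · simp only [List.mem_singleton] at h1; subst h1; exact le_refl _
        · have hf : lexLt3 (-(pvScoreLen ns st cap).1, (pvScoreLen ns st cap).2, cap) bb.1 = false := by
            rw [hkm]
            exact Bool.eq_false_iff.mpr (fun hx => hlt ((lexLt3_iff e m).1 hx))
          simp only [hf, Bool.false_eq_true, if_false]
          refine ⟨by simp, ?_⟩
          intro k c hk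
          simp only [Option.some.injEq] at hk
          have hk1 : k = bb.1 := by rw [hk]
          have hc1 : c = bb.2 := by rw [hk]
          refine ⟨m, List.mem_append_left _ hm, hk1 ▸ hkm, hc1 ▸ hcm, ?_⟩
          have hge : pvKey m ≤ pvKey e := le_of_not_gt hlt
          intro e' he'
          rcases List.mem_append.1 he' with h1 | h1
          · exact hmin e' h1
          · simp only [List.mem_singleton] at h1; subst h1; exact hge
    · simp only [hs, if_neg, not_false_iff]
      exact h

theorem identify_capability_from_skill_spec : Claim_equal_identify_capability_from_skill := by
  intro skill capability_list _
  unfold Spec_identify_capability_from_skill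
  unfold identify_capability_from_skill identify_capability_from_skill_alt
  by_cases hns : pvNormalize skill.toList = []
  · simp [hns]
  · simp only [hns, if_neg, not_false_iff]
    set ns := pvNormalize skill.toList
    set st := PySem.Set.ofList (PySem.Chars.split₀ ns)
    set ranked := capability_list.foldl (pvStepA ns st) [] with hranked
    have hrel : pvRel ranked (capability_list.foldl (pvStepB ns st) none) :=
      pvRel_fold ns st capability_list [] none ⟨fun _ => rfl, by simp⟩
    match hb : capability_list.foldl (pvStepB ns st) none with
    | none =>
      have : ranked = [] := hrel.1 (by rw [hb])
      simp [this]
    | some bb =>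
      obtain ⟨m, hm, _, hcm, hmin⟩ := hrel.2 bb.1 bb.2 (by rw [hb])
      have hne : ranked ≠ [] := by intro h; rw [h] at hm; exact absurd hm (List.not_mem_nil)
      simp only [hne, if_neg, not_false_iff]
      have hsne : PySem.List.sorted ranked
          (fun item => toLex ((-item.1 : Int), toLex (item.2.1, item.2.2))) false ≠ [] := by
        rw [Ne, PySem.List.sorted_eq_nil_iff]; exact hne
      match hsort : PySem.List.sorted ranked
          (fun item => toLex ((-item.1 : Int), toLex (item.2.1, item.2.2))) false with
      | [] => exact absurd hsort hsne
      | h :: t =>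
        have hhm : h ∈ ranked := by
          have : h ∈ PySem.List.sorted ranked
              (fun item => toLex ((-item.1 : Int), toLex (item.2.1, item.2.2))) false := by
            rw [hsort]; exact List.mem_cons_self
          exact (PySem.List.mem_sorted ranked _ false h).1 this
        have hhmin : ∀ y ∈ ranked, pvKey h ≤ pvKey y := by
          intro y hy
          simpa [pvKey] using PySem.List.key_head_sorted_le _ _ hsort y hy
        have heq : h = m := by
          apply pvKey_inj
          exact le_antisymm (hhmin m hm) (hmin h hhm)
        simp [heq, hcm]
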